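-- pv_equiv track=rewrite | github.com/jka236/silab-file-login | project/main.py | perm2mask
-- ===== SOURCE A (Python) =====
-- import stat
--
-- def perm2mask(p):
--
--     if len(p) != 9:
--         return "Bad permission length"
--     if not all(p[k] in "rw-" for k in [0, 1, 3, 4, 6, 7]):
--         return "Bad permission format (read-write)"
--
--     if not all(p[k] in "xs-" for k in [2, 5]):
--         return "Bad permission format (execute)"
--
--     if not p[8] in "xt-":
--         return "Bad permission format (execute other)"
--
--     m = 0
--
--     if p[0] == "r":
--         m |= stat.S_IRUSR
--     if p[1] == "w":
--         m |= stat.S_IWUSR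
--     if p[2] == "x":
--         m |= stat.S_IXUSR
--     if p[2] == "s":
--         m |= stat.S_IXUSR | stat.S_ISUID
--
--     if p[3] == "r":
--         m |= stat.S_IRGRP
--     if p[4] == "w":
--         m |= stat.S_IWGRP
--     if p[5] == "x":
--         m |= stat.S_IXGRP
--     if p[5] == "s":
--         m |= stat.S_IXGRP | stat.S_ISGID
--
--     if p[6] == "r":
--         m |= stat.S_IROTH
--     if p[7] == "w":
--         m |= stat.S_IWOTH
--     if p[8] == "x":
--         m |= stat.S_IXOTH
--     if p[8] == "t":
--         m |= stat.S_IXOTH | stat.S_ISVTX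
--
--     return m
-- ===== SOURCE B (Python) =====
-- # Per-position table: allowed character -> the mode bits it contributes
-- # (octal constants equal to stat.S_IRUSR .. stat.S_ISVTX).
-- _TABLE = [
--     {"r": 0o400, "w": 0, "-": 0},
--     {"w": 0o200, "r": 0, "-": 0},
--     {"x": 0o100, "s": 0o100 | 0o4000, "-": 0},
--     {"r": 0o040, "w": 0, "-": 0},
--     {"w": 0o020, "r": 0, "-": 0},
--     {"x": 0o010, "s": 0o010 | 0o2000, "-": 0},
--     {"r": 0o004, "w": 0, "-": 0},
--     {"w": 0o002, "r": 0, "-": 0},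
--     {"x": 0o001, "t": 0o001 | 0o1000, "-": 0},
-- ]
--
--
-- def perm2mask(p):
--     if len(p) != 9:
--         return "Bad permission length"
--     if not all(p[k] in "rw-" for k in [0, 1, 3, 4, 6, 7]):
--         return "Bad permission format (read-write)"
--     if not all(p[k] in "xs-" for k in [2, 5]):
--         return "Bad permission format (execute)"
--     if not p[8] in "xt-":
--         return "Bad permission format (execute other)"
--     m = 0
--     for d, c in zip(_TABLE, p):
--         m |= d[c]
--     return m
-- ===== Notes on version B (the rewrite author's own statement) =====
-- stated objective: idiomatic
-- what changed: A's twelve unrolled if/bit-or statements are replaced by a fixed table of nine per-position dicts (character -> contributed bits, with the setuid/setgid/sticky combos as table entries) OR-ed in a single zip loop; the validation order and error messages are unchanged.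
import Mathlib
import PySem

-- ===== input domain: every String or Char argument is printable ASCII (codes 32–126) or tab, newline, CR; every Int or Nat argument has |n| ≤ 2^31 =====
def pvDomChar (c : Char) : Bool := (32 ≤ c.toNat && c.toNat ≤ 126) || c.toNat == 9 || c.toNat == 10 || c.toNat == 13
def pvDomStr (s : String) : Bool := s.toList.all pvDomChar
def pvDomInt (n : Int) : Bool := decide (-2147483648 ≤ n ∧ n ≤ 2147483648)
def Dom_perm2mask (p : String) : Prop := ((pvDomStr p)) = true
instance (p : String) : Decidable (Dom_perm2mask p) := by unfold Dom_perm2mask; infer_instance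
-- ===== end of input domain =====

-- B replaces A's twelve unrolled bit-or ifs by one pass OR-ing per-position dict-table lookups (objective: idiomatic; same cost).
-- Python returns an int mask on success and an error string otherwise; per the type convention the ports return the str() of that value.
-- Python `m |= x` on int is ported as Int.lor (exact).

-- ===== PORT A =====
-- the mask-building chain of A (`m = 0; if p[0]=='r': m |= …; …; return m`), step for step
def pvMaskA (cs : List Char) : Int :=
  let m : Int := 0
  let m := if cs.getD 0 ' ' = 'r' then Int.lor m 256 else m
  let m := if cs.getD 1 ' ' = 'w' then Int.lor m 128 else m
  let m := if cs.getD 2 ' ' = 'x' then Int.lor m 64 else m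
  let m := if cs.getD 2 ' ' = 's' then Int.lor m (Int.lor 64 2048) else m
  let m := if cs.getD 3 ' ' = 'r' then Int.lor m 32 else m
  let m := if cs.getD 4 ' ' = 'w' then Int.lor m 16 else m
  let m := if cs.getD 5 ' ' = 'x' then Int.lor m 8 else m
  let m := if cs.getD 5 ' ' = 's' then Int.lor m (Int.lor 8 1024) else m
  let m := if cs.getD 6 ' ' = 'r' then Int.lor m 4 else m
  let m := if cs.getD 7 ' ' = 'w' then Int.lor m 2 else m
  let m := if cs.getD 8 ' ' = 'x' then Int.lor m 1 else m
  let m := if cs.getD 8 ' ' = 't' then Int.lor m (Int.lor 1 512) else m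
  m

def perm2mask (p : String) : String :=
  let cs := p.toList
  if cs.length ≠ 9 then "Bad permission length"
  else if !(([0, 1, 3, 4, 6, 7] : List Nat).all (fun k => (['r', 'w', '-'] : List Char).contains (cs.getD k ' '))) then
    "Bad permission format (read-write)"
  else if !(([2, 5] : List Nat).all (fun k => (['x', 's', '-'] : List Char).contains (cs.getD k ' '))) then
    "Bad permission format (execute)"
  else if !((['x', 't', '-'] : List Char).contains (cs.getD 8 ' ')) then
    "Bad permission format (execute other)"
  else
    -- all indexing is at positions 0–8 of a length-9 list, so getD is exact (no IndexError possible)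
    PySem.Int.toStr (pvMaskA cs)

-- ===== PORT B =====
-- Source B's _TABLE: one dict per position mapping each allowed character to the bits it contributes
def pvTable : List (PySem.Dict Char Int) :=
  [PySem.Dict.ofList [('r', 256), ('w', 0), ('-', 0)],
   PySem.Dict.ofList [('w', 128), ('r', 0), ('-', 0)],
   PySem.Dict.ofList [('x', 64), ('s', Int.lor 64 2048), ('-', 0)],
   PySem.Dict.ofList [('r', 32), ('w', 0), ('-', 0)],
   PySem.Dict.ofList [('w', 16), ('r', 0), ('-', 0)],
   PySem.Dict.ofList [('x', 8), ('s', Int.lor 8 1024), ('-', 0)],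
   PySem.Dict.ofList [('r', 4), ('w', 0), ('-', 0)],
   PySem.Dict.ofList [('w', 2), ('r', 0), ('-', 0)],
   PySem.Dict.ofList [('x', 1), ('t', Int.lor 1 512), ('-', 0)]]

def perm2mask_alt (p : String) : String :=
  let cs := p.toList
  if cs.length ≠ 9 then "Bad permission length"
  else if !(([0, 1, 3, 4, 6, 7] : List Nat).all (fun k => (['r', 'w', '-'] : List Char).contains (cs.getD k ' '))) then
    "Bad permission format (read-write)"
  else if !(([2, 5] : List Nat).all (fun k => (['x', 's', '-'] : List Char).contains (cs.getD k ' '))) then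
    "Bad permission format (execute)"
  else if !((['x', 't', '-'] : List Char).contains (cs.getD 8 ' ')) then
    "Bad permission format (execute other)"
  else
    -- d[c]: after validation the key is always present, so KeyError is impossible; .getD 0 is exact there
    PySem.Int.toStr ((pvTable.zip cs).foldl (fun m dc => Int.lor m ((PySem.Dict.get? dc.1 dc.2).getD 0)) 0)

-- ===== PRECONDITION & SPEC =====
def Spec_perm2mask (p : String) (out : String) : Prop := out = perm2mask_alt p
instance (p : String) (out : String) : Decidable (Spec_perm2mask p out) := by unfold Spec_perm2mask; infer_instance

-- ===== CLAIM (what is proved, stated in full; the proofs are below) =====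
def Claim_equal_perm2mask : Prop := ∀ (p : String), Dom_perm2mask p → Spec_perm2mask p (perm2mask p)

-- ===== LEMMAS AND PROOFS =====

theorem pv_ldiff_zero (n : Nat) : n.ldiff 0 = n :=
  Nat.eq_of_testBit_eq (fun i => by simp [Nat.testBit_ldiff])

theorem pv_lor_zero (m : Int) : Int.lor m 0 = m := by
  cases m <;> simp [Int.lor, pv_ldiff_zero]

theorem pv_step_r (m b : Int) (c : Char) (h : c = 'r' ∨ c = 'w' ∨ c = '-') :
    (if c = 'r' then Int.lor m b else m)
      = Int.lor m ((PySem.Dict.get? (PySem.Dict.ofList [('r', b), ('w', 0), ('-', 0)]) c).getD 0) := by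
  rcases h with h | h | h <;> subst h <;>
    simp [PySem.Dict.ofList, PySem.Dict.get?, PySem.Dict.update, PySem.Dict.insert,
      PySem.Dict.empty, PySem.Dict.contains, pv_lor_zero]

theorem pv_step_w (m b : Int) (c : Char) (h : c = 'r' ∨ c = 'w' ∨ c = '-') :
    (if c = 'w' then Int.lor m b else m)
      = Int.lor m ((PySem.Dict.get? (PySem.Dict.ofList [('w', b), ('r', 0), ('-', 0)]) c).getD 0) := by
  rcases h with h | h | h <;> subst h <;>
    simp [PySem.Dict.ofList, PySem.Dict.get?, PySem.Dict.update, PySem.Dict.insert,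
      PySem.Dict.empty, PySem.Dict.contains, pv_lor_zero]

theorem pv_step_xs (m bx bs : Int) (c : Char) (h : c = 'x' ∨ c = 's' ∨ c = '-') :
    (if c = 's' then Int.lor (if c = 'x' then Int.lor m bx else m) (Int.lor bx bs)
      else (if c = 'x' then Int.lor m bx else m))
      = Int.lor m ((PySem.Dict.get? (PySem.Dict.ofList [('x', bx), ('s', Int.lor bx bs), ('-', 0)]) c).getD 0) := by
  rcases h with h | h | h <;> subst h <;>
    simp [PySem.Dict.ofList, PySem.Dict.get?, PySem.Dict.update, PySem.Dict.insert,
      PySem.Dict.empty, PySem.Dict.contains, pv_lor_zero]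

theorem pv_step_xt (m bx bt : Int) (c : Char) (h : c = 'x' ∨ c = 't' ∨ c = '-') :
    (if c = 't' then Int.lor (if c = 'x' then Int.lor m bx else m) (Int.lor bx bt)
      else (if c = 'x' then Int.lor m bx else m))
      = Int.lor m ((PySem.Dict.get? (PySem.Dict.ofList [('x', bx), ('t', Int.lor bx bt), ('-', 0)]) c).getD 0) := by
  rcases h with h | h | h <;> subst h <;>
    simp [PySem.Dict.ofList, PySem.Dict.get?, PySem.Dict.update, PySem.Dict.insert,
      PySem.Dict.empty, PySem.Dict.contains, pv_lor_zero]

theorem pv_list9 {α : Type} (l : List α) (h : l.length = 9) :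
    ∃ a b c d e f g h' i, l = [a, b, c, d, e, f, g, h', i] := by
  match l, h with
  | [a, b, c, d, e, f, g, h', i], _ => exact ⟨a, b, c, d, e, f, g, h', i, rfl⟩

theorem pv_ite_congr4 {α : Type} (C1 C2 C3 C4 : Prop) [Decidable C1] [Decidable C2] [Decidable C3]
    [Decidable C4] (x1 x2 x3 x4 a b : α) (h : ¬C1 → ¬C2 → ¬C3 → ¬C4 → a = b) :
    (if C1 then x1 else if C2 then x2 else if C3 then x3 else if C4 then x4 else a)
      = (if C1 then x1 else if C2 then x2 else if C3 then x3 else if C4 then x4 else b) := by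
  split_ifs with h1 h2 h3 h4
  · rfl
  · rfl
  · rfl
  · rfl
  · exact h h1 h2 h3 h4

theorem pv_mask_eq (cs : List Char) (hlen : ¬ cs.length ≠ 9)
    (h2 : ¬ (!(([0, 1, 3, 4, 6, 7] : List Nat).all (fun k => (['r', 'w', '-'] : List Char).contains (cs.getD k ' ')))) = true)
    (h3 : ¬ (!(([2, 5] : List Nat).all (fun k => (['x', 's', '-'] : List Char).contains (cs.getD k ' ')))) = true)
    (h4 : ¬ (!((['x', 't', '-'] : List Char).contains (cs.getD 8 ' '))) = true) :
    PySem.Int.toStr (pvMaskA cs)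
      = PySem.Int.toStr ((pvTable.zip cs).foldl (fun m dc => Int.lor m ((PySem.Dict.get? dc.1 dc.2).getD 0)) 0) := by
  obtain ⟨c0, c1, c2, c3, c4, c5, c6, c7, c8, hl⟩ := pv_list9 cs (by omega)
  subst hl
  simp only [List.all_cons, List.all_nil, List.contains_cons, List.contains_nil,
    List.getD_cons_zero, List.getD_cons_succ, Bool.not_eq_true', Bool.and_eq_true,
    Bool.or_eq_true, beq_iff_eq, Bool.not_eq_false, Bool.or_false, and_true] at h2 h3 h4
  obtain ⟨m0, m1, m3, m4, m6, m7⟩ := h2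
  obtain ⟨m2, m5⟩ := h3
  show _ = _
  unfold pvMaskA pvTable
  simp only [List.zip_cons_cons, List.zip_nil_right, List.foldl_cons, List.foldl_nil,
    List.getD_cons_zero, List.getD_cons_succ]
  rw [pv_step_xt _ _ _ c8 (by tauto), pv_step_w _ _ c7 (by tauto), pv_step_r _ _ c6 (by tauto),
    pv_step_xs _ _ _ c5 (by tauto), pv_step_w _ _ c4 (by tauto), pv_step_r _ _ c3 (by tauto),
    pv_step_xs _ _ _ c2 (by tauto), pv_step_w _ _ c1 (by tauto), pv_step_r _ _ c0 (by tauto)]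

-- ===== VERDICT (by name: the statement is the Claim_ definition above) =====
theorem perm2mask_spec : Claim_equal_perm2mask := by
  intro p _
  unfold Spec_perm2mask perm2mask perm2mask_alt
  exact pv_ite_congr4 _ _ _ _ _ _ _ _ _ _ (fun h1 h2 h3 h4 => pv_mask_eq p.toList h1 h2 h3 h4)
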